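-- pv_equiv track=rewrite | github.com/antikov/advent_of_code_2018 | day6/solution_1.py | get_nearest_cluster
-- ===== SOURCE A (Python) =====
-- import math
--
-- def distance(point1, point2):
--     return abs(point1[0] - point2[0]) + abs(point1[1] - point2[1])
--
-- def get_nearest_cluster(clusters, x, y):
--     min_distance = math.inf
--     min_index = -1
--     for index, xy in enumerate(clusters):
--         dist = distance(xy, (x, y))
--         if dist < min_distance:
--             min_distance = dist
--             min_index = index
--         elif dist == min_distance:
--             min_index = -1
--     return min_index
-- ===== SOURCE B (Python) =====
-- def get_nearest_cluster(clusters, x, y):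
--     if not clusters:
--         return -1
--     dists = [abs(cx - x) + abs(cy - y) for cx, cy in clusters]
--     m = min(dists)
--     return dists.index(m) if dists.count(m) == 1 else -1
-- ===== Notes on version B (the rewrite author's own statement) =====
-- stated objective: simpler
-- what changed: Replaces the running-minimum-with-tie-sentinel single scan by separate whole-list passes: build the distance table, take min, count ties, and look up the first index.
import Mathlib
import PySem

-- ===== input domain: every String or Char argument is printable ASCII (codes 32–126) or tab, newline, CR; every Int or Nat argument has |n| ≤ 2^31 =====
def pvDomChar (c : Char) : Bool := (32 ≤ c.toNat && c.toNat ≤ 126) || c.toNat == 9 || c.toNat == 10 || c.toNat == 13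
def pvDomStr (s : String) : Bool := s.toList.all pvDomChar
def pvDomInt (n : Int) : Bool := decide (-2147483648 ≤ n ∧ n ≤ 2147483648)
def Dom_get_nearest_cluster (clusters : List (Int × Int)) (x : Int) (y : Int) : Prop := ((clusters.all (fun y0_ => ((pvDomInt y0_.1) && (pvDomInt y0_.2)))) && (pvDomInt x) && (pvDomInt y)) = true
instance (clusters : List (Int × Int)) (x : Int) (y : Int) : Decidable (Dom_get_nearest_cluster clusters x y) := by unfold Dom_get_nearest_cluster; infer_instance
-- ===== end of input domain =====

-- B computes the distance table once and finds min/tie-count/first-index in separate passes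
-- instead of A's running-minimum-with-sentinel scan; objective: simpler.


-- ===== PORT A =====
-- helper 'distance' from the Python module
def distance (point1 point2 : Int × Int) : Int :=
  |point1.1 - point2.1| + |point1.2 - point2.2|

-- loop body of A; the accumulator is (min_distance, min_index), where 'none' encodes math.inf
def gncStep (x y : Int) (st : Option Int × Int) (p : Int × (Int × Int)) : Option Int × Int :=
  let dist := distance p.2 (x, y)
  match st.1 with
  | none => (some dist, p.1)                      -- dist < math.inf always
  | some md =>
    if dist < md then (some dist, p.1)
    else if dist = md then (some md, -1)
    else st

def get_nearest_cluster (clusters : List (Int × Int)) (x : Int) (y : Int) : Int :=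
  ((PySem.List.enumerate clusters 0).foldl (gncStep x y) (none, -1)).2

-- ===== PORT B =====
def get_nearest_cluster_alt (clusters : List (Int × Int)) (x : Int) (y : Int) : Int :=
  if clusters = [] then -1
  else
    let dists := clusters.map (fun c => |c.1 - x| + |c.2 - y|)
    match PySem.List.min? dists (fun d => d) with
    | none => -1                                  -- unreachable: dists ≠ []
    | some m =>
      if PySem.List.count dists m = 1 then
        match PySem.List.index? dists m with
        | some i => (i : Int)
        | none => -1                              -- unreachable: m ∈ dists
      else -1

-- ===== PRECONDITION & SPEC =====
def Spec_get_nearest_cluster (clusters : List (Int × Int)) (x : Int) (y : Int) (out : Int) : Prop := out = get_nearest_cluster_alt clusters x y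
instance (clusters : List (Int × Int)) (x : Int) (y : Int) (out : Int) : Decidable (Spec_get_nearest_cluster clusters x y out) := by unfold Spec_get_nearest_cluster; infer_instance

-- ===== CLAIM (what is proved, stated in full; the proofs are below) =====
def Claim_equal_get_nearest_cluster : Prop := ∀ (clusters : List (Int × Int)) (x : Int) (y : Int), Dom_get_nearest_cluster clusters x y → Spec_get_nearest_cluster clusters x y (get_nearest_cluster clusters x y)

-- ===== LEMMAS AND PROOFS =====

theorem foldl_min_le_init (l : List Int) (a : Int) : l.foldl min a ≤ a := by
  induction l generalizing a with
  | nil => simp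
  | cons h t ih => exact le_trans (ih (min a h)) (min_le_left a h)

theorem foldl_min_le_mem (l : List Int) (a e : Int) (he : e ∈ l) : l.foldl min a ≤ e := by
  induction l generalizing a with
  | nil => cases he
  | cons h t ih =>
    rcases List.mem_cons.mp he with rfl | he'
    · exact le_trans (foldl_min_le_init t (min a e)) (min_le_right a e)
    · exact ih (min a h) he'

theorem foldl_min_eq_init (l : List Int) (a : Int) (h : ∀ e ∈ l, a ≤ e) : l.foldl min a = a := by
  induction l with
  | nil => rfl
  | cons hd t ih =>
    simp only [List.foldl_cons]
    rw [min_eq_left (h hd (List.mem_cons_self))]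
    exact ih (fun e he => h e (List.mem_cons_of_mem hd he))

-- A's loop body acting on the distance value directly
def dStep (st : Option Int × Int) (p : Int × Int) : Option Int × Int :=
  match st.1 with
  | none => (some p.2, p.1)
  | some md => if p.2 < md then (some p.2, p.1) else if p.2 = md then (some md, -1) else st

theorem gnc_bridge (x y : Int) (cl : List (Int × Int)) : ∀ (k : Int) (st : Option Int × Int),
    (PySem.List.enumerate cl k).foldl (gncStep x y) st =
      (PySem.List.enumerate (cl.map (fun c => |c.1 - x| + |c.2 - y|)) k).foldl dStep st := by
  induction cl with
  | nil => intro k st; rfl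
  | cons c t ih =>
    intro k st
    simp only [List.map_cons, PySem.List.enumerate_cons, List.foldl_cons]
    rw [ih]
    rfl

-- core invariant of A's loop over the distance list, once min_distance is a real number m
theorem count_cons_ne (d M : Int) (t : List Int) (h : d ≠ M) :
    List.count M (d :: t) = List.count M t := by simp [h]

theorem idxOf_cons_ne (d M : Int) (t : List Int) (h : d ≠ M) :
    List.idxOf M (d :: t) = List.idxOf M t + 1 := by simp [h]

theorem d_core : ∀ (ds : List Int) (k m idx : Int),
    (PySem.List.enumerate ds k).foldl dStep (some m, idx) =
      (some (ds.foldl min m),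
       if ds.all (fun d => decide (m < d)) then idx
       else if ds.count (ds.foldl min m) = 1 ∧ ds.foldl min m < m
         then k + ((ds.idxOf (ds.foldl min m) : Nat) : Int)
         else -1) := by
  intro ds
  induction ds with
  | nil => intro k m idx; rfl
  | cons d t ih =>
    intro k m idx
    simp only [PySem.List.enumerate_cons, List.foldl_cons]
    by_cases hdm : d < m
    · have hstep : dStep (some m, idx) (k, d) = (some d, k) := by simp [dStep, hdm]
      rw [hstep, ih (k + 1) d k]
      have hmin : min m d = d := min_eq_right (le_of_lt hdm)
      have hnotall : (List.all (d :: t) fun e => decide (m < e)) = false := by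
        simp [List.all_cons]; intro h; omega
      simp only [List.foldl_cons, hmin, hnotall, Prod.mk.injEq, Bool.false_eq_true, if_false]
      refine ⟨by trivial, ?_⟩
      set M := t.foldl min d with hMdef
      have hMd : M ≤ d := foldl_min_le_init t d
      have hMm : M < m := lt_of_le_of_lt hMd hdm
      by_cases ta : (List.all t fun e => decide (d < e)) = true
      · have hM : M = d := by
          apply foldl_min_eq_init
          intro e he
          have := List.all_eq_true.mp ta e he
          simp at this; omega
        have hc0 : List.count M t = 0 := by
          rw [List.count_eq_zero]
          intro hmem
          have := List.all_eq_true.mp ta M hmem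
          simp at this; omega
        have hcnt : List.count M (d :: t) = 1 := by
          rw [hM, List.count_cons_self]
          rw [hM] at hc0
          omega
        have hidx : List.idxOf M (d :: t) = 0 := by rw [hM]; exact List.idxOf_cons_self
        rw [ta]
        simp only [if_pos rfl]
        rw [if_pos (show List.count M (d :: t) = 1 ∧ M < m from ⟨hcnt, hMm⟩), hidx]
        simp
      · rw [Bool.not_eq_true] at ta
        rw [ta]
        simp only [Bool.false_eq_true, if_false]
        obtain ⟨e, he, hed⟩ : ∃ e ∈ t, e ≤ d := by
          by_contra h
          push_neg at h
          apply absurd ta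
          simp only [Bool.not_eq_false, List.all_eq_true]
          intro a ha; have := h a ha; simp; omega
        by_cases hdM : d = M
        · have heM : e = M := le_antisymm (hdM ▸ hed) (foldl_min_le_mem t d e he)
          have h1 : 1 ≤ List.count M t := List.one_le_count_iff.mpr (heM ▸ he)
          have hcnt : List.count M (d :: t) = List.count M t + 1 := by
            rw [hdM, List.count_cons_self]
          rw [hcnt]
          split_ifs <;> omega
        · have hMd' : M < d := lt_of_le_of_ne hMd (Ne.symm hdM)
          rw [count_cons_ne d M t hdM, idxOf_cons_ne d M t hdM]
          split_ifs <;> push_cast <;> omega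
    · by_cases hde : d = m
      · subst hde
        have hstep : dStep (some d, idx) (k, d) = (some d, -1) := by simp [dStep]
        rw [hstep, ih (k + 1) d (-1)]
        have hnotall : (List.all (d :: t) fun e => decide (d < e)) = false := by
          simp [List.all_cons]
        simp only [List.foldl_cons, min_self, hnotall, Prod.mk.injEq, Bool.false_eq_true, if_false]
        refine ⟨by trivial, ?_⟩
        set M := t.foldl min d with hMdef
        have hMd : M ≤ d := foldl_min_le_init t d
        by_cases hMlt : M < d
        · have hdM : d ≠ M := by omega
          rw [count_cons_ne d M t hdM, idxOf_cons_ne d M t hdM]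
          by_cases ta : (List.all t fun e => decide (d < e)) = true
          · exfalso
            have : d ≤ M := by
              apply le_of_eq
              symm
              apply foldl_min_eq_init
              intro e he
              have := List.all_eq_true.mp ta e he
              simp at this; omega
            omega
          · rw [Bool.not_eq_true] at ta
            rw [ta]
            simp only [Bool.false_eq_true, if_false]
            split_ifs <;> push_cast <;> omega
        · have hMeq : M = d := le_antisymm hMd (by omega)
          split_ifs <;> omega
      · have hmd : m < d := by omega
        have hstep : dStep (some m, idx) (k, d) = (some m, idx) := by
          simp only [dStep]
          rw [if_neg hdm, if_neg hde]
        rw [hstep, ih (k + 1) m idx]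
        have hmin : min m d = m := min_eq_left (le_of_lt hmd)
        have hall : (List.all (d :: t) fun e => decide (m < e)) = (List.all t fun e => decide (m < e)) := by
          simp [List.all_cons, hmd]
        simp only [List.foldl_cons, hmin, hall, Prod.mk.injEq]
        refine ⟨by trivial, ?_⟩
        set M := t.foldl min m with hMdef
        have hMm : M ≤ m := foldl_min_le_init t m
        have hdM : d ≠ M := fun h => absurd (h ▸ hMm) (not_le.mpr hmd)
        by_cases ta : (List.all t fun e => decide (m < e)) = true
        · rw [ta]
          simp
        · rw [Bool.not_eq_true] at ta
          rw [ta]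
          simp only [Bool.false_eq_true, if_false]
          rw [count_cons_ne d M t hdM, idxOf_cons_ne d M t hdM]
          split_ifs <;> push_cast <;> omega

theorem index?_of_mem (l : List Int) (v : Int) (h : v ∈ l) :
    PySem.List.index? l v = some (l.idxOf v) := by
  induction l with
  | nil => cases h
  | cons a t ih =>
    by_cases hav : a = v
    · subst hav; rw [PySem.List.index?_cons_self, List.idxOf_cons_self]
    · rcases List.mem_cons.mp h with rfl | ht
      · exact absurd rfl hav
      · rw [PySem.List.index?_cons_of_ne t hav, ih ht, idxOf_cons_ne a v t hav]
        rfl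

-- ===== VERDICT (by name: the statement is the Claim_ definition above) =====
theorem get_nearest_cluster_spec : Claim_equal_get_nearest_cluster := by
  unfold Claim_equal_get_nearest_cluster
  intro clusters x y _
  unfold Spec_get_nearest_cluster
  cases clusters with
  | nil => rfl
  | cons c t =>
    unfold get_nearest_cluster get_nearest_cluster_alt
    rw [gnc_bridge]
    simp only [List.map_cons, PySem.List.enumerate_cons, List.foldl_cons,
      if_neg (List.cons_ne_nil c t), PySem.List.min?_id_cons, PySem.List.count_eq]
    have hstep0 : dStep ((none : Option Int), (-1 : Int)) ((0 : Int), |c.1 - x| + |c.2 - y|)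
        = (some (|c.1 - x| + |c.2 - y|), 0) := rfl
    rw [hstep0]
    simp only [zero_add]
    rw [d_core (t.map fun c => |c.1 - x| + |c.2 - y|) 1 (|c.1 - x| + |c.2 - y|) 0]
    set d0 := |c.1 - x| + |c.2 - y| with hd0
    set ts := t.map fun c => |c.1 - x| + |c.2 - y| with hts
    set M := ts.foldl min d0 with hMdef
    have hMd : M ≤ d0 := foldl_min_le_init ts d0
    by_cases ta : (List.all ts fun e => decide (d0 < e)) = true
    · have hM : M = d0 := by
        apply foldl_min_eq_init
        intro e he
        have := List.all_eq_true.mp ta e he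
        simp at this; omega
      have hc0 : List.count M ts = 0 := by
        rw [List.count_eq_zero]
        intro hmem
        have := List.all_eq_true.mp ta M hmem
        simp at this; omega
      have hcnt : List.count M (d0 :: ts) = 1 := by
        rw [hM, List.count_cons_self]
        rw [hM] at hc0
        omega
      rw [ta, if_pos rfl, hcnt, if_pos rfl, hM, PySem.List.index?_cons_self]
      simp
    · rw [Bool.not_eq_true] at ta
      rw [ta]
      simp only [Bool.false_eq_true, if_false]
      obtain ⟨e, he, hed⟩ : ∃ e ∈ ts, e ≤ d0 := by
        by_contra h
        push_neg at h
        apply absurd ta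
        simp only [Bool.not_eq_false, List.all_eq_true]
        intro a ha; have := h a ha; simp; omega
      by_cases hdM : d0 = M
      · have heM : e = M := le_antisymm (hdM ▸ hed) (foldl_min_le_mem ts d0 e he)
        have h1 : 1 ≤ List.count M ts := List.one_le_count_iff.mpr (heM ▸ he)
        have hcnt : List.count M (d0 :: ts) = List.count M ts + 1 := by
          rw [hdM, List.count_cons_self]
        rw [hcnt]
        rw [if_neg (fun h => absurd h.2 (by omega)), if_neg (show ¬(List.count M ts + 1 = 1) by omega)]
      · have hMd' : M < d0 := lt_of_le_of_ne hMd (Ne.symm hdM)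
        rw [count_cons_ne d0 M ts hdM]
        by_cases hc1 : List.count M ts = 1
        · have hmem : M ∈ ts := List.one_le_count_iff.mp (by omega)
          rw [if_pos ⟨hc1, hMd'⟩, if_pos hc1,
            PySem.List.index?_cons_of_ne ts hdM, index?_of_mem ts M hmem]
          simp
          omega
        · rw [if_neg (fun h => absurd h.1 hc1), if_neg hc1]
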